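-- pv_equiv track=rewrite | github.com/Velite/test_tasks | mts_task2/load.py | get_tweet_value
-- ===== SOURCE A (Python) =====
-- def get_tweet_value(text, costs):
-- 	result = 0
-- 	if text is not "":
-- 		text_words = list(map(lambda s: "".join(c for c in s if c.isalnum()), text.split()))
-- 		# y = lambda x: costs.get(x, 0) if x in costs.keys() else 0
-- 		# z = reduce(lambda x, v: x + y(v), text_words, 0)
-- 		for w in text_words:
-- 			if w in costs.keys():
-- 				result += costs.get(w, 0)
-- 	return result
-- ===== SOURCE B (Python) =====
-- def get_tweet_value(text, costs):
--     words = ["".join(c for c in w if c.isalnum()) for w in text.split()]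
--     tally = {}
--     for w in words:
--         tally[w] = tally.get(w, 0) + 1
--     result = 0
--     for word, cost in costs.items():
--         result += cost * tally.get(word, 0)
--     return result
-- ===== Notes on version B (the rewrite author's own statement) =====
-- stated objective: alternative
-- what changed: Instead of scanning the word stream and looking each word up in the cost dict, B builds a frequency tally of the cleaned words once and then scans the cost table, accumulating cost * frequency per key.
import Mathlib
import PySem

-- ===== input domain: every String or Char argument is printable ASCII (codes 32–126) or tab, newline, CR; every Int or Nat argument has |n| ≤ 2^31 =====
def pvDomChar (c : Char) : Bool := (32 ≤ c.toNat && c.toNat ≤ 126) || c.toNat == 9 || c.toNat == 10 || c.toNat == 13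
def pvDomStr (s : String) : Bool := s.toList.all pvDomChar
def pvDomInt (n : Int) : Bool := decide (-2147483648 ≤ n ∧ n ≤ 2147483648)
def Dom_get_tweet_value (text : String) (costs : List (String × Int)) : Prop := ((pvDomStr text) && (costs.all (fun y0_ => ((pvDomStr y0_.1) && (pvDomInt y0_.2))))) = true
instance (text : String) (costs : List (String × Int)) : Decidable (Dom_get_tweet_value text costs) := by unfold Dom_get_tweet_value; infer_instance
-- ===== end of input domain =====

-- B replaces A's per-word dict-membership loop by a one-pass word-frequency tally
-- followed by a scan of the cost table (alternative decomposition, same cost).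

-- cleaned word: "".join(c for c in s if c.isalnum())
def pvClean (s : String) : String := String.ofList (s.toList.filter PySem.Chars.isalnum)

-- ===== PORT A =====
def get_tweet_value (text : String) (costs : List (String × Int)) : Int :=
  let result : Int := 0
  if text ≠ "" then
    let d := PySem.Dict.ofList costs
    let text_words := (PySem.Str.split₀ text).map pvClean
    text_words.foldl (fun result w =>
      if d.contains w then result + d.getD w 0 else result) result
  else result

-- ===== PORT B =====
def get_tweet_value_alt (text : String) (costs : List (String × Int)) : Int :=
  let words := (PySem.Str.split₀ text).map pvClean
  let tally := words.foldl (fun t w => t.insert w (t.getD w 0 + 1)) PySem.Dict.empty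
  (PySem.Dict.ofList costs).items.foldl (fun result kv => result + kv.2 * tally.getD kv.1 0) 0

-- ===== PRECONDITION & SPEC =====
def Spec_get_tweet_value (text : String) (costs : List (String × Int)) (out : Int) : Prop := out = get_tweet_value_alt text costs
instance (text : String) (costs : List (String × Int)) (out : Int) : Decidable (Spec_get_tweet_value text costs out) := by unfold Spec_get_tweet_value; infer_instance

-- ===== CLAIM (what is proved, stated in full; the proofs are below) =====
def Claim_equal_get_tweet_value : Prop := ∀ (text : String) (costs : List (String × Int)), Dom_get_tweet_value text costs → Spec_get_tweet_value text costs (get_tweet_value text costs)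

-- ===== LEMMAS AND PROOFS =====

-- if w is not among the keys of the list, every indicator term vanishes
theorem pv_sum_ind_not_mem (l : List (String × Int)) (w : String)
    (h : w ∉ l.map Prod.fst) :
    (l.map (fun kv => if kv.1 = w then kv.2 else 0)).sum = 0 := by
  induction l with
  | nil => simp
  | cons p rest ih =>
    simp only [List.map_cons, List.mem_cons, not_or] at h ⊢
    rw [List.sum_cons, ih h.2, if_neg (fun he => h.1 he.symm), zero_add]

-- the indicator sum over a nodup-key dict picks out exactly the stored value
theorem pv_sum_ind (d : PySem.Dict String Int) (hnd : d.keys.Nodup) (w : String) :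
    (d.items.map (fun kv => if kv.1 = w then kv.2 else 0)).sum
      = if d.contains w then d.getD w 0 else 0 := by
  obtain ⟨l⟩ := d
  induction l with
  | nil => simp [PySem.Dict.contains]
  | cons p rest ih =>
    simp only [PySem.Dict.keys_mk, List.map_cons, List.nodup_cons] at hnd
    by_cases hw : p.1 = w
    · subst hw
      have h0 := pv_sum_ind_not_mem rest p.1 (by simpa using hnd.1)
      simp [PySem.Dict.contains, PySem.Dict.getD, PySem.Dict.get?, h0]
    · have hb : (p.1 == w) = false := by simp [hw]
      have ih' := ih (by simpa [PySem.Dict.keys_mk] using hnd.2)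
      rw [PySem.Dict.items] at ih' ⊢
      rw [List.map_cons, List.sum_cons, if_neg hw, zero_add, ih']
      simp only [PySem.Dict.contains, PySem.Dict.getD, PySem.Dict.get?, List.any_cons, hb,
        Bool.false_or]
      rw [List.find?_cons_of_neg (by simp [hw])]

-- core: per-word filtered sum over ws equals per-key weighted counts over d.items
theorem pv_core (d : PySem.Dict String Int) (hnd : d.keys.Nodup) (ws : List String) :
    (ws.map (fun w => if d.contains w then d.getD w 0 else 0)).sum
      = (d.items.map (fun kv => kv.2 * (ws.count kv.1 : Int))).sum := by
  induction ws with
  | nil => simp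
  | cons w ws ih =>
    rw [List.map_cons, List.sum_cons, ih]
    have hsplit : ∀ kv : String × Int,
        kv.2 * (((w :: ws).count kv.1 : Nat) : Int)
          = kv.2 * (ws.count kv.1 : Int) + (if kv.1 = w then kv.2 else 0) := by
      intro kv
      rw [List.count_cons]
      push_cast
      by_cases h : kv.1 = w
      · simp [h]; ring
      · simp only [h, if_false, beq_iff_eq]
        rw [if_neg (fun he => h he.symm)]
        ring
    calc (if d.contains w then d.getD w 0 else 0)
            + (d.items.map (fun kv => kv.2 * (ws.count kv.1 : Int))).sum
        = (d.items.map (fun kv => kv.2 * (ws.count kv.1 : Int))).sum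
            + (d.items.map (fun kv => if kv.1 = w then kv.2 else 0)).sum := by
          rw [pv_sum_ind d hnd w]; ring
      _ = (d.items.map (fun kv => kv.2 * (((w :: ws).count kv.1 : Nat) : Int))).sum := by
          rw [← List.sum_map_add]
          congr 1
          exact (List.map_congr_left (fun kv _ => (hsplit kv).symm))

-- B's value, unfolded to the weighted-count sum
theorem pv_B_eq (text : String) (costs : List (String × Int)) :
    get_tweet_value_alt text costs
      = (((PySem.Dict.ofList costs).items).map
          (fun kv => kv.2 * ((((PySem.Str.split₀ text).map pvClean).count kv.1 : Nat) : Int))).sum := by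
  show (PySem.Dict.ofList costs).items.foldl
      (fun result kv => result + kv.2 *
        (((PySem.Str.split₀ text).map pvClean).foldl
          (fun t w => t.insert w (t.getD w 0 + 1)) PySem.Dict.empty).getD kv.1 0) 0
    = _
  have hadd := PySem.List.foldl_add ((PySem.Dict.ofList costs).items)
       (fun kv : String × Int => kv.2 *
         (((PySem.Str.split₀ text).map pvClean).foldl
           (fun t w => t.insert w (t.getD w 0 + 1))
           (PySem.Dict.empty : PySem.Dict String Int)).getD kv.1 0) 0
  rw [hadd, zero_add]
  congr 1
  apply List.map_congr_left
  intro kv _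
  rw [PySem.Dict.getD_foldl_insert_add_one]
  simp [PySem.Dict.getD_empty]

-- A's value, unfolded to the per-word sum
theorem pv_A_eq (text : String) (costs : List (String × Int)) :
    get_tweet_value text costs
      = (((PySem.Str.split₀ text).map pvClean).map
          (fun w => if (PySem.Dict.ofList costs).contains w
                    then (PySem.Dict.ofList costs).getD w 0 else 0)).sum := by
  by_cases h : text = ""
  · subst h
    show (0 : Int) = _
    simp [PySem.Str.split₀, PySem.Chars.split₀, PySem.Chars.split₀.go]
  · show (if text ≠ "" then
        ((PySem.Str.split₀ text).map pvClean).foldl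
          (fun result w => if (PySem.Dict.ofList costs).contains w
            then result + (PySem.Dict.ofList costs).getD w 0 else result) 0
      else 0) = _
    rw [if_pos h]
    rw [PySem.List.foldl_congr_mem ((PySem.Str.split₀ text).map pvClean)
        (fun result w => if (PySem.Dict.ofList costs).contains w
            then result + (PySem.Dict.ofList costs).getD w 0 else result)
        (fun result w => result + (if (PySem.Dict.ofList costs).contains w
            then (PySem.Dict.ofList costs).getD w 0 else 0)) 0
        (by intro acc x _
            by_cases hx : (PySem.Dict.ofList costs).contains x <;> simp [hx])]
    rw [PySem.List.foldl_add ((PySem.Str.split₀ text).map pvClean)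
        (fun w => if (PySem.Dict.ofList costs).contains w
            then (PySem.Dict.ofList costs).getD w 0 else 0) 0, zero_add]

-- ===== VERDICT (by name: the statement is the Claim_ definition above) =====
theorem get_tweet_value_spec : Claim_equal_get_tweet_value := by
  intro text costs _
  unfold Spec_get_tweet_value
  rw [pv_A_eq, pv_B_eq]
  exact pv_core (PySem.Dict.ofList costs) (PySem.Dict.nodup_keys_ofList costs)
    ((PySem.Str.split₀ text).map pvClean)
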